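-- pv_equiv track=rewrite | github.com/asarandi/advent_of_code-2019 | day_03/part01.py | intersections
-- ===== SOURCE A (Python) =====
-- def is_vertical(line):
--     src, dst = line
--     return True if src[1] == dst[1] else False      # same x coordinate for both
--
-- def fix(line):
--     src, dst = line
--     sy, sx = src
--     dy, dx = dst
--     if is_vertical(line):
--         return (dst, src) if sy > dy else (src, dst)
--     else:
--         return (dst, src) if sx > dx else (src, dst)
--
-- def intersections(wire1,wire2):
--     res = []
--     for line1 in wire1:
--         for line2 in wire2:
--             if is_vertical(line1) == is_vertical(line2):
--                 continue
--             line1 = fix(line1)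
--             line2 = fix(line2)
--             src0, dst0 = line1
--             src1, dst1 = line2
--             if is_vertical(line1):
--                 if not ((src0[0] <= src1[0]) and (dst0[0] >= src1[0])):
--                     continue
--                 if not ((src1[1] <= src0[1]) and (dst1[1] >= src0[1])):
--                     continue
--                 res.append((src1[0], src0[1]))
--             else:
--                 if not ((src1[0] <= src0[0]) and (dst1[0] >= src0[0])):
--                     continue
--                 if not ((src0[1] <= src1[1]) and (dst0[1] >= src1[1])):
--                     continue
--                 res.append((src0[0], src1[1]))
--     if (0,0) in res:
--         res.remove((0,0))
--     return res
-- ===== SOURCE B (Python) =====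
-- def _bisect_left(keys, x):
--     # leftmost insertion point of x in the sorted int list keys
--     lo, hi = 0, len(keys)
--     while lo < hi:
--         mid = (lo + hi) // 2
--         if keys[mid] < x:
--             lo = mid + 1
--         else:
--             hi = mid
--     return lo
--
--
-- def _query(keys, index, lo, hi, c, key_is_row):
--     # index is sorted by key; keys = [e[0] for e in index].
--     # Return the crossing points of entries whose key lies in [lo, hi] and
--     # whose perpendicular range [a, b] contains c, in original wire order (by j).
--     i = _bisect_left(keys, lo)
--     hits = []
--     for key, a, b, j in index[i:]:
--         if key > hi:
--             break
--         if a <= c <= b: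
--             hits.append((j, (key, c) if key_is_row else (c, key)))
--     hits.sort(key=lambda t: t[0])
--     return [p for _, p in hits]
--
--
-- def intersections(wire1, wire2):
--     # Index wire2 once: vertical segments keyed by x, horizontal segments keyed
--     # by their row (y of the leftmost endpoint); each entry carries its
--     # perpendicular extent and its original position j.  Sort each index by key
--     # so every wire1 segment is answered by a binary-searched range query.
--     verts, horizs = [], []
--     for j, ((sy, sx), (dy, dx)) in enumerate(wire2):
--         if sx == dx:
--             verts.append((sx, min(sy, dy), max(sy, dy), j))
--         else:
--             horizs.append((sy if sx <= dx else dy, min(sx, dx), max(sx, dx), j))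
--     verts.sort(key=lambda t: t[0])
--     horizs.sort(key=lambda t: t[0])
--     vkeys = [t[0] for t in verts]
--     hkeys = [t[0] for t in horizs]
--     pts = []
--     for (sy, sx), (dy, dx) in wire1:
--         if sx == dx:
--             pts += _query(hkeys, horizs, min(sy, dy), max(sy, dy), sx, True)
--         else:
--             pts += _query(vkeys, verts, min(sx, dx), max(sx, dx),
--                           sy if sx <= dx else dy, False)
--     # drop the first origin crossing, if any
--     for i, p in enumerate(pts):
--         if p == (0, 0):
--             return pts[:i] + pts[i + 1:]
--     return pts
-- ===== Notes on version B (the rewrite author's own statement) =====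
-- stated objective: faster
-- what changed: B replaces A's all-pairs nested scan (with per-pair re-normalization) by two key-sorted indexes of wire2 (verticals by x, horizontals by row y) built once; each wire1 segment is answered by a binary-searched range query over the perpendicular index that stops at the key window's right edge, and each query's hits are re-sorted by original wire2 position to reproduce A's output order.
import Mathlib
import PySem

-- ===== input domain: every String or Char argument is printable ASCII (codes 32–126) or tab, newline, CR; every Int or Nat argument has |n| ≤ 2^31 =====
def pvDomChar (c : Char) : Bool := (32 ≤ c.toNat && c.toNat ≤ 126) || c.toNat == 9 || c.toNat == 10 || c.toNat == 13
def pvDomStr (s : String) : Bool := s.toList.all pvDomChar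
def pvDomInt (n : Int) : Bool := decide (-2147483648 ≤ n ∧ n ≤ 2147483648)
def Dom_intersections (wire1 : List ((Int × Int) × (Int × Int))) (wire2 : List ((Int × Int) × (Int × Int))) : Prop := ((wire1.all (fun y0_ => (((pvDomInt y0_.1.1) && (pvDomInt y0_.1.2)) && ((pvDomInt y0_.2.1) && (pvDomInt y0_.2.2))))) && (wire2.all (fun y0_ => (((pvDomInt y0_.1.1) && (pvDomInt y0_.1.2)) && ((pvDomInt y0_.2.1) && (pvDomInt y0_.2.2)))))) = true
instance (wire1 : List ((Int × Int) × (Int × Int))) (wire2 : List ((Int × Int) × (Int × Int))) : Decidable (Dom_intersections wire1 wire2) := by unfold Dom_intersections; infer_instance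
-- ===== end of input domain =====

-- B replaces A's all-pairs scan by two key-sorted indexes of wire2 queried per
-- wire1 segment with binary search, reordering each query's hits by original
-- wire2 position (objective: faster; measured much faster on large inputs).

-- ===== PORT A =====
def isVertical (line : (Int × Int) × (Int × Int)) : Bool :=
  if line.1.2 == line.2.2 then true else false

def fixLine (line : (Int × Int) × (Int × Int)) : (Int × Int) × (Int × Int) :=
  let src := line.1
  let dst := line.2
  if isVertical line then
    if src.1 > dst.1 then (dst, src) else (src, dst)
  else
    if src.2 > dst.2 then (dst, src) else (src, dst)

-- one inner-loop body of A (Python rebinds line1 to fix(line1) inside the inner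
-- loop; fix is idempotent and orientation-preserving, so recomputing fix(line1)
-- each iteration computes the same values)
def stepA (line1 : (Int × Int) × (Int × Int)) (res : List (Int × Int))
    (line2 : (Int × Int) × (Int × Int)) : List (Int × Int) :=
  if isVertical line1 == isVertical line2 then res
  else
    let l1 := fixLine line1
    let l2 := fixLine line2
    let src0 := l1.1
    let dst0 := l1.2
    let src1 := l2.1
    let dst1 := l2.2
    if isVertical l1 then
      if ¬(src0.1 ≤ src1.1 ∧ dst0.1 ≥ src1.1) then res
      else if ¬(src1.2 ≤ src0.2 ∧ dst1.2 ≥ src0.2) then res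
      else res ++ [(src1.1, src0.2)]
    else
      if ¬(src1.1 ≤ src0.1 ∧ dst1.1 ≥ src0.1) then res
      else if ¬(src0.2 ≤ src1.2 ∧ dst0.2 ≥ src1.2) then res
      else res ++ [(src0.1, src1.2)]

def intersections (wire1 : List ((Int × Int) × (Int × Int))) (wire2 : List ((Int × Int) × (Int × Int))) : List (Int × Int) :=
  let res := wire1.foldl (fun res line1 => wire2.foldl (stepA line1) res) []
  if (0, 0) ∈ res then (PySem.List.remove? res ((0 : Int), (0 : Int))).getD res else res

-- ===== PORT B =====
-- index entry: (key, a, b, j) — key = x for a vertical / row y for a horizontal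
-- wire2 segment, [a, b] its perpendicular extent, j its position in wire2.
-- Source B builds both index lists in one enumerate loop; ported as one filterMap
-- over PySem.List.enumerate per orientation (same entries, same order).
def vertIdx (wire : List ((Int × Int) × (Int × Int))) : List (Int × Int × Int × Int) :=
  (PySem.List.enumerate wire 0).filterMap (fun e =>
    if e.2.1.2 == e.2.2.2 then
      some (e.2.1.2, min e.2.1.1 e.2.2.1, max e.2.1.1 e.2.2.1, e.1)
    else none)

def horizIdx (wire : List ((Int × Int) × (Int × Int))) : List (Int × Int × Int × Int) :=
  (PySem.List.enumerate wire 0).filterMap (fun e =>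
    if e.2.1.2 == e.2.2.2 then none
    else
      some ((if e.2.1.2 ≤ e.2.2.2 then e.2.1 else e.2.2).1,
        min e.2.1.2 e.2.2.2, max e.2.1.2 e.2.2.2, e.1))

-- Source B's `for … in index[i:]` loop with break: collect (j, point) while key ≤ hi
def scanHits (hi c : Int) (keyRow : Bool) : List (Int × Int × Int × Int) → List (Int × (Int × Int))
  | [] => []
  | e :: t =>
    if e.1 > hi then []
    else if e.2.1 ≤ c ∧ c ≤ e.2.2.1 then
      (e.2.2.2, if keyRow then (e.1, c) else (c, e.1)) :: scanHits hi c keyRow t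
    else scanHits hi c keyRow t

-- Source B's _query: binary search the left edge of [lo, hi] in the key list
-- (hand-written CPython bisect_left in Source B = PySem.List.bisectLeft), scan with
-- break, sort the hits back into original wire2 order, strip the index
def query (keys : List Int) (index : List (Int × Int × Int × Int)) (lo hi c : Int) (keyRow : Bool) : List (Int × Int) :=
  (PySem.List.sorted (scanHits hi c keyRow (index.drop (PySem.List.bisectLeft keys lo))) (fun t => t.1)).map (fun t => t.2)

-- exact port of Source B's final enumerate loop: remove the first (0,0), keep the rest
def dropOrigin : List (Int × Int) → List (Int × Int)
  | [] => []
  | p :: t => if p = ((0 : Int), (0 : Int)) then t else p :: dropOrigin t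

def intersections_alt (wire1 : List ((Int × Int) × (Int × Int))) (wire2 : List ((Int × Int) × (Int × Int))) : List (Int × Int) :=
  let verts := PySem.List.sorted (vertIdx wire2) (fun t => t.1)
  let horizs := PySem.List.sorted (horizIdx wire2) (fun t => t.1)
  let vkeys := verts.map (fun t => t.1)
  let hkeys := horizs.map (fun t => t.1)
  let pts := wire1.flatMap (fun s =>
    if s.1.2 == s.2.2 then
      query hkeys horizs (min s.1.1 s.2.1) (max s.1.1 s.2.1) s.1.2 true
    else
      query vkeys verts (min s.1.2 s.2.2) (max s.1.2 s.2.2) (if s.1.2 ≤ s.2.2 then s.1 else s.2).1 false)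
  dropOrigin pts

-- ===== PRECONDITION & SPEC =====
def Spec_intersections (wire1 : List ((Int × Int) × (Int × Int))) (wire2 : List ((Int × Int) × (Int × Int))) (out : List (Int × Int)) : Prop := out = intersections_alt wire1 wire2
instance (wire1 : List ((Int × Int) × (Int × Int))) (wire2 : List ((Int × Int) × (Int × Int))) (out : List (Int × Int)) : Decidable (Spec_intersections wire1 wire2 out) := by unfold Spec_intersections; infer_instance

-- ===== CLAIM (what is proved, stated in full; the proofs are below) =====
def Claim_equal_intersections : Prop := ∀ (wire1 : List ((Int × Int) × (Int × Int))) (wire2 : List ((Int × Int) × (Int × Int))), Dom_intersections wire1 wire2 → Spec_intersections wire1 wire2 (intersections wire1 wire2)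

-- ===== LEMMAS AND PROOFS =====

-- the hit test of a wire2 horizontal (y, xlo, xhi) against a wire1 vertical at
-- x = c spanning y ∈ [lo, hi], and its mirror image
def hitsH (c lo hi : Int) (h : Int × Int × Int) : Option (Int × Int) :=
  if lo ≤ h.1 ∧ h.1 ≤ hi ∧ h.2.1 ≤ c ∧ c ≤ h.2.2 then some (h.1, c) else none

def hitsV (c lo hi : Int) (v : Int × Int × Int) : Option (Int × Int) :=
  if lo ≤ v.1 ∧ v.1 ≤ hi ∧ v.2.1 ≤ c ∧ c ≤ v.2.2 then some (c, v.1) else none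

-- wire2's perpendicular entries in original order, without indices
def vertIndex (wire : List ((Int × Int) × (Int × Int))) : List (Int × Int × Int) :=
  (wire.filter (fun s => s.1.2 == s.2.2)).map
    (fun s => (s.1.2, min s.1.1 s.2.1, max s.1.1 s.2.1))

def horizIndex (wire : List ((Int × Int) × (Int × Int))) : List (Int × Int × Int) :=
  (wire.filter (fun s => s.1.2 != s.2.2)).map
    (fun s => ((if s.1.2 ≤ s.2.2 then s.1 else s.2).1, min s.1.2 s.2.2, max s.1.2 s.2.2))

-- the single-pair contribution of A, as an optional point
def contrib (line1 line2 : (Int × Int) × (Int × Int)) : Option (Int × Int) :=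
  if isVertical line1 == isVertical line2 then none
  else if isVertical line1 then
    (hitsH line1.1.2 (min line1.1.1 line1.2.1) (max line1.1.1 line1.2.1))
      ((if line2.1.2 ≤ line2.2.2 then line2.1 else line2.2).1, min line2.1.2 line2.2.2, max line2.1.2 line2.2.2)
  else
    (hitsV (if line1.1.2 ≤ line1.2.2 then line1.1 else line1.2).1 (min line1.1.2 line1.2.2) (max line1.1.2 line1.2.2))
      (line2.1.2, min line2.1.1 line2.2.1, max line2.1.1 line2.2.1)

set_option maxHeartbeats 2000000 in
set_option maxRecDepth 200000 in
theorem stepA_eq (l1 res l2) : stepA l1 res l2 = res ++ (contrib l1 l2).toList := by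
  obtain ⟨⟨a, b⟩, ⟨c, d⟩⟩ := l1
  obtain ⟨⟨e, f⟩, ⟨g, h⟩⟩ := l2
  simp only [stepA, contrib, isVertical, fixLine, hitsH, hitsV]
  split_ifs <;> (try dsimp only at *) <;> simp only [beq_iff_eq, not_true, not_false_iff] at * <;>
    first
      | rfl
      | (exfalso; omega)
      | (simp only [Option.toList, List.append_nil, List.append_right_inj,
          List.cons.injEq, Prod.mk.injEq, and_true, true_and]
         omega)
      | simp

theorem inner_eq (l1 : (Int × Int) × (Int × Int)) (w2 : List ((Int × Int) × (Int × Int)))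
    (res : List (Int × Int)) :
    w2.foldl (stepA l1) res = res ++ w2.filterMap (contrib l1) := by
  induction w2 generalizing res with
  | nil => simp
  | cons h t ih =>
    simp only [List.foldl_cons, List.filterMap_cons, stepA_eq]
    cases hc : contrib l1 h <;> simp [ih]

theorem filterMap_contrib_vert (l1 : (Int × Int) × (Int × Int)) (h1 : isVertical l1 = true)
    (w2 : List ((Int × Int) × (Int × Int))) :
    w2.filterMap (contrib l1) =
      (horizIndex w2).filterMap (hitsH l1.1.2 (min l1.1.1 l1.2.1) (max l1.1.1 l1.2.1)) := by
  induction w2 with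
  | nil => simp [horizIndex]
  | cons h t ih =>
    by_cases hv : isVertical h = true
    · have : contrib l1 h = none := by simp [contrib, h1, hv]
      have hf : (h.1.2 != h.2.2) = false := by
        simp only [isVertical] at hv; split at hv <;> simp_all
      have hsk : horizIndex (h :: t) = horizIndex t := by
        simp [horizIndex, hf]
      simp only [List.filterMap_cons, this, hsk]
      exact ih
    · have hb : isVertical h = false := by simpa using hv
      have hf : (h.1.2 != h.2.2) = true := by
        simp only [isVertical] at hb; split at hb <;> simp_all
      have : contrib l1 h = hitsH l1.1.2 (min l1.1.1 l1.2.1) (max l1.1.1 l1.2.1)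
          ((if h.1.2 ≤ h.2.2 then h.1 else h.2).1, min h.1.2 h.2.2, max h.1.2 h.2.2) := by
        simp [contrib, h1, hb]
      simp only [List.filterMap_cons, this, horizIndex, List.filter_cons, hf]
      cases hc : hitsH l1.1.2 (min l1.1.1 l1.2.1) (max l1.1.1 l1.2.1)
          ((if h.1.2 ≤ h.2.2 then h.1 else h.2).1, min h.1.2 h.2.2, max h.1.2 h.2.2) <;>
        simpa [horizIndex, hc] using ih

theorem filterMap_contrib_horiz (l1 : (Int × Int) × (Int × Int)) (h1 : isVertical l1 = false)
    (w2 : List ((Int × Int) × (Int × Int))) :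
    w2.filterMap (contrib l1) =
      (vertIndex w2).filterMap (hitsV (if l1.1.2 ≤ l1.2.2 then l1.1 else l1.2).1
        (min l1.1.2 l1.2.2) (max l1.1.2 l1.2.2)) := by
  induction w2 with
  | nil => simp [vertIndex]
  | cons h t ih =>
    by_cases hv : isVertical h = true
    · have hf : (h.1.2 == h.2.2) = true := by
        simp only [isVertical] at hv; split at hv <;> simp_all
      have : contrib l1 h = hitsV (if l1.1.2 ≤ l1.2.2 then l1.1 else l1.2).1
          (min l1.1.2 l1.2.2) (max l1.1.2 l1.2.2)
          (h.1.2, min h.1.1 h.2.1, max h.1.1 h.2.1) := by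
        simp [contrib, h1, hv]
      simp only [List.filterMap_cons, this, vertIndex, List.filter_cons, hf]
      cases hc : hitsV (if l1.1.2 ≤ l1.2.2 then l1.1 else l1.2).1
          (min l1.1.2 l1.2.2) (max l1.1.2 l1.2.2)
          (h.1.2, min h.1.1 h.2.1, max h.1.1 h.2.1) <;>
        simpa [vertIndex, hc] using ih
    · have hb : isVertical h = false := by simpa using hv
      have : contrib l1 h = none := by simp [contrib, h1, hb]
      have hf : (h.1.2 == h.2.2) = false := by
        simp only [isVertical] at hb; split at hb <;> simp_all
      simp only [List.filterMap_cons, this, vertIndex, List.filter_cons, hf]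
      simpa [vertIndex] using ih

theorem remove_eq_dropOrigin (res : List (Int × Int)) :
    (if ((0 : Int), (0 : Int)) ∈ res then (PySem.List.remove? res ((0 : Int), (0 : Int))).getD res else res)
      = dropOrigin res := by
  induction res with
  | nil => simp [dropOrigin]
  | cons p t ih =>
    by_cases hp : p = ((0 : Int), (0 : Int))
    · subst hp; simp [dropOrigin, PySem.List.remove?_cons_self]
    · simp only [dropOrigin, if_neg hp, List.mem_cons]
      by_cases hm : ((0 : Int), (0 : Int)) ∈ t
      · rw [if_pos (Or.inr hm)]
        have hne : p ≠ ((0 : Int), (0 : Int)) := hp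
        rw [PySem.List.remove?_cons_of_ne t hne]
        rw [if_pos hm] at ih
        cases hr : PySem.List.remove? t ((0 : Int), (0 : Int)) with
        | none => simp [PySem.List.remove?_eq_none_iff] at hr; exact absurd hm hr
        | some r => simp [hr] at ih ⊢; exact ih
      · rw [if_neg (by simp [hp, hm, Ne.symm])]
        rw [if_neg hm] at ih
        exact congrArg (p :: ·) ih

-- ---- B-side: the range query over the sorted index equals the plain filter ----

-- full per-entry test of a query (includes the key window)
def qf (lo hi c : Int) (kr : Bool) (e : Int × Int × Int × Int) : Option (Int × (Int × Int)) :=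
  if lo ≤ e.1 ∧ e.1 ≤ hi ∧ e.2.1 ≤ c ∧ c ≤ e.2.2.1 then
    some (e.2.2.2, if kr then (e.1, c) else (c, e.1))
  else none

-- what the break-scan tests (the left edge is the binary search's job)
def qg (hi c : Int) (kr : Bool) (e : Int × Int × Int × Int) : Option (Int × (Int × Int)) :=
  if e.1 ≤ hi ∧ e.2.1 ≤ c ∧ c ≤ e.2.2.1 then
    some (e.2.2.2, if kr then (e.1, c) else (c, e.1))
  else none


theorem qf_fst {lo hi c : Int} {kr : Bool} {e : Int × Int × Int × Int} {r : Int × (Int × Int)}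
    (h : qf lo hi c kr e = some r) : r.1 = e.2.2.2 := by
  unfold qf at h
  split at h
  · injection h with h; rw [← h]
  · simp at h

theorem scanHits_eq (hi c : Int) (kr : Bool) (l : List (Int × Int × Int × Int))
    (hl : l.Pairwise (fun a b => a.1 ≤ b.1)) :
    scanHits hi c kr l = l.filterMap (qg hi c kr) := by
  induction l with
  | nil => simp [scanHits]
  | cons e t ih =>
    obtain ⟨hhd, htl⟩ := List.pairwise_cons.mp hl
    by_cases hhi : e.1 > hi
    · have h1 : qg hi c kr e = none := by
        unfold qg; rw [if_neg (by omega)]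
      have h2 : t.filterMap (qg hi c kr) = [] := by
        rw [List.filterMap_eq_nil_iff]
        intro a ha
        have := hhd a ha
        unfold qg; rw [if_neg (by omega)]
      simp [scanHits, hhi, h1, h2]
    · by_cases hp : e.2.1 ≤ c ∧ c ≤ e.2.2.1
      · have h1 : qg hi c kr e = some (e.2.2.2, if kr then (e.1, c) else (c, e.1)) := by
          unfold qg; rw [if_pos ⟨by omega, hp.1, hp.2⟩]
        rw [List.filterMap_cons_some h1]
        simp [scanHits, hhi, hp, ih htl]
      · have h1 : qg hi c kr e = none := by
          unfold qg; rw [if_neg (by tauto)]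
        rw [List.filterMap_cons_none h1]
        simp [scanHits, hhi, hp, ih htl]

theorem query_eq (E : List (Int × Int × Int × Int)) (lo hi c : Int) (kr : Bool)
    (hj : E.Pairwise (fun a b => a.2.2.2 < b.2.2.2)) :
    query ((PySem.List.sorted E (fun t => t.1)).map (fun t => t.1))
      (PySem.List.sorted E (fun t => t.1)) lo hi c kr
      = (E.filterMap (qf lo hi c kr)).map (fun t => t.2) := by
  have hkpw := PySem.List.sorted_map_key_pairwise E (fun t => t.1)
  obtain ⟨hile, hlt, hge⟩ := PySem.List.bisectLeft_spec _ lo hkpw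
  set S := PySem.List.sorted E (fun t => t.1) with hS
  set i := PySem.List.bisectLeft (S.map (fun t => t.1)) lo with hi0
  have hlenk : (S.map (fun t => t.1)).length = S.length := List.length_map ..
  have hSpw : S.Pairwise (fun a b => a.1 ≤ b.1) := PySem.List.sorted_pairwise E (fun t => t.1)
  -- the scan computes the filter of the dropped suffix
  have h1 : scanHits hi c kr (S.drop i) = (S.drop i).filterMap (qg hi c kr) :=
    scanHits_eq hi c kr _ (hSpw.drop)
  -- on the suffix the key's left bound holds, so qg agrees with qf
  have h2 : (S.drop i).filterMap (qf lo hi c kr) = (S.drop i).filterMap (qg hi c kr) := by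
    apply List.filterMap_congr
    intro a ha
    obtain ⟨q, hq, rfl⟩ := List.mem_iff_getElem.mp ha
    have hq' : i + q < S.length := by
      rw [List.length_drop] at hq; omega
    have hkey : lo ≤ ((S.drop i)[q]).1 := by
      have hm : lo ≤ (S.map (fun t => t.1))[i + q]'(by omega) :=
        hge (i + q) (by omega) (by omega)
      rw [List.getElem_map] at hm
      rw [List.getElem_drop]
      exact hm
    simp only [qf, qg]
    split_ifs with hA hB hB <;> first | rfl | (exfalso; tauto)
  -- the prefix before the binary-search index fails the left bound
  have h3 : (S.take i).filterMap (qf lo hi c kr) = [] := by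
    rw [List.filterMap_eq_nil_iff]
    intro a ha
    obtain ⟨q, hq, rfl⟩ := List.mem_iff_getElem.mp ha
    have hq1 : q < i := by
      rw [List.length_take] at hq; omega
    have hq2 : q < S.length := by
      rw [List.length_take] at hq; omega
    have hkey : (S[q]'hq2).1 < lo := by
      have hm : (S.map (fun t => t.1))[q]'(by omega) < lo := hlt q (by omega) hq1
      rw [List.getElem_map] at hm
      exact hm
    simp only [List.getElem_take, qf]
    rw [if_neg (by omega)]
  -- hence the whole-list filter is exactly the scan's output, in S's order
  have h4 : S.filterMap (qf lo hi c kr) = scanHits hi c kr (S.drop i) := by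
    conv_lhs => rw [← List.take_append_drop i S]
    rw [List.filterMap_append, h3, List.nil_append, h2, ← h1]
  -- qf keeps each entry's original index, so the j-sort restores E's order
  have h5 : PySem.List.sorted (scanHits hi c kr (S.drop i)) (fun t => t.1)
      = E.filterMap (qf lo hi c kr) := by
    rw [← h4]
    apply PySem.List.sorted_eq_of_perm_of_pairwise_lt
    · exact (List.Perm.filterMap _ (PySem.List.sorted_perm E (fun t => t.1) false)).symm
    · refine hj.filterMap _ (fun a a' hR b hb b' hb' => ?_)
      rw [qf_fst hb, qf_fst hb']
      exact hR
  show (PySem.List.sorted (scanHits hi c kr (S.drop i)) (fun t => t.1)).map (fun t => t.2) = _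
  rw [h5]

theorem pairwise_j_vertIdx (w : List ((Int × Int) × (Int × Int))) :
    (vertIdx w).Pairwise (fun a b => a.2.2.2 < b.2.2.2) := by
  refine (PySem.List.pairwise_lt_enumerate w 0).filterMap _ (fun a a' hR b hb b' hb' => ?_)
  have hb1 : b.2.2.2 = a.1 := by
    split at hb
    · injection hb with h; rw [← h]
    · simp at hb
  have hb2 : b'.2.2.2 = a'.1 := by
    split at hb'
    · injection hb' with h; rw [← h]
    · simp at hb'
  rw [hb1, hb2]; exact hR

theorem pairwise_j_horizIdx (w : List ((Int × Int) × (Int × Int))) :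
    (horizIdx w).Pairwise (fun a b => a.2.2.2 < b.2.2.2) := by
  refine (PySem.List.pairwise_lt_enumerate w 0).filterMap _ (fun a a' hR b hb b' hb' => ?_)
  have hb1 : b.2.2.2 = a.1 := by
    split at hb
    · simp at hb
    · injection hb with h; rw [← h]
  have hb2 : b'.2.2.2 = a'.1 := by
    split at hb'
    · simp at hb'
    · injection hb' with h; rw [← h]
  rw [hb1, hb2]; exact hR

-- dropping the carried indices turns the indexed filter into A's plain filter
theorem proj_horiz (w : List ((Int × Int) × (Int × Int))) (lo hi c : Int) :
    ((horizIdx w).filterMap (qf lo hi c true)).map (fun t => t.2)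
      = (horizIndex w).filterMap (hitsH c lo hi) := by
  suffices h : ∀ (s : Int),
      (((PySem.List.enumerate w s).filterMap (fun e =>
        if e.2.1.2 == e.2.2.2 then none
        else
          some ((if e.2.1.2 ≤ e.2.2.2 then e.2.1 else e.2.2).1,
            min e.2.1.2 e.2.2.2, max e.2.1.2 e.2.2.2, e.1))).filterMap (qf lo hi c true)).map (fun t => t.2)
        = (horizIndex w).filterMap (hitsH c lo hi) by
    exact h 0
  induction w with
  | nil => intro s; simp [horizIndex, PySem.List.enumerate_nil]
  | cons x t ih =>
    intro s
    rw [PySem.List.enumerate_cons]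
    by_cases hv : (x.1.2 == x.2.2) = true
    · -- x is vertical: both sides skip it
      have hsk : horizIndex (x :: t) = horizIndex t := by
        have : (x.1.2 != x.2.2) = false := by simp_all
        simp [horizIndex, this]
      rw [List.filterMap_cons_none (by dsimp only; rw [if_pos hv]), hsk]
      exact ih (s + 1)
    · have hhi : horizIndex (x :: t) =
          ((if x.1.2 ≤ x.2.2 then x.1 else x.2).1, min x.1.2 x.2.2, max x.1.2 x.2.2) :: horizIndex t := by
        have hf : (x.1.2 != x.2.2) = true := by simp_all
        simp [horizIndex, hf]
      rw [List.filterMap_cons_some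
        (by dsimp only; rw [if_neg hv] :
          _ = some ((if x.1.2 ≤ x.2.2 then x.1 else x.2).1, min x.1.2 x.2.2, max x.1.2 x.2.2, s)), hhi]
      by_cases hc : lo ≤ (if x.1.2 ≤ x.2.2 then x.1 else x.2).1 ∧
          (if x.1.2 ≤ x.2.2 then x.1 else x.2).1 ≤ hi ∧ min x.1.2 x.2.2 ≤ c ∧ c ≤ max x.1.2 x.2.2
      · rw [List.filterMap_cons_some (by unfold qf; rw [if_pos hc]; rfl :
            qf lo hi c true ((if x.1.2 ≤ x.2.2 then x.1 else x.2).1, min x.1.2 x.2.2, max x.1.2 x.2.2, s)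
              = some (s, ((if x.1.2 ≤ x.2.2 then x.1 else x.2).1, c)))]
        rw [List.filterMap_cons_some (by unfold hitsH; rw [if_pos hc] :
            hitsH c lo hi ((if x.1.2 ≤ x.2.2 then x.1 else x.2).1, min x.1.2 x.2.2, max x.1.2 x.2.2)
              = some ((if x.1.2 ≤ x.2.2 then x.1 else x.2).1, c))]
        rw [List.map_cons, ih (s + 1)]
      · rw [List.filterMap_cons_none (by unfold qf; rw [if_neg hc])]
        rw [List.filterMap_cons_none (by unfold hitsH; rw [if_neg hc])]
        exact ih (s + 1)

theorem proj_vert (w : List ((Int × Int) × (Int × Int))) (lo hi c : Int) :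
    ((vertIdx w).filterMap (qf lo hi c false)).map (fun t => t.2)
      = (vertIndex w).filterMap (hitsV c lo hi) := by
  suffices h : ∀ (s : Int),
      (((PySem.List.enumerate w s).filterMap (fun e =>
        if e.2.1.2 == e.2.2.2 then
          some (e.2.1.2, min e.2.1.1 e.2.2.1, max e.2.1.1 e.2.2.1, e.1)
        else none)).filterMap (qf lo hi c false)).map (fun t => t.2)
        = (vertIndex w).filterMap (hitsV c lo hi) by
    exact h 0
  induction w with
  | nil => intro s; simp [vertIndex, PySem.List.enumerate_nil]
  | cons x t ih =>
    intro s
    rw [PySem.List.enumerate_cons]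
    by_cases hv : (x.1.2 == x.2.2) = true
    · have hvi : vertIndex (x :: t) =
          (x.1.2, min x.1.1 x.2.1, max x.1.1 x.2.1) :: vertIndex t := by
        simp [vertIndex, hv]
      rw [List.filterMap_cons_some
        (by dsimp only; rw [if_pos hv] :
          _ = some (x.1.2, min x.1.1 x.2.1, max x.1.1 x.2.1, s)), hvi]
      by_cases hc : lo ≤ x.1.2 ∧ x.1.2 ≤ hi ∧ min x.1.1 x.2.1 ≤ c ∧ c ≤ max x.1.1 x.2.1
      · rw [List.filterMap_cons_some (by unfold qf; rw [if_pos hc]; rfl :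
            qf lo hi c false (x.1.2, min x.1.1 x.2.1, max x.1.1 x.2.1, s) = some (s, (c, x.1.2)))]
        rw [List.filterMap_cons_some (by unfold hitsV; rw [if_pos hc] :
            hitsV c lo hi (x.1.2, min x.1.1 x.2.1, max x.1.1 x.2.1) = some (c, x.1.2))]
        rw [List.map_cons, ih (s + 1)]
      · rw [List.filterMap_cons_none (by unfold qf; rw [if_neg hc])]
        rw [List.filterMap_cons_none (by unfold hitsV; rw [if_neg hc])]
        exact ih (s + 1)
    · have : vertIndex (x :: t) = vertIndex t := by
        simp [vertIndex, hv]
      rw [List.filterMap_cons_none (by dsimp only; rw [if_neg hv]), this]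
      exact ih (s + 1)

-- ===== VERDICT (by name: the statement is the Claim_ definition above) =====
theorem intersections_spec : Claim_equal_intersections := by
  intro wire1 wire2 _
  show intersections wire1 wire2 = intersections_alt wire1 wire2
  unfold intersections intersections_alt
  dsimp only []
  rw [remove_eq_dropOrigin]
  congr 1
  have hgen : ∀ (l : List ((Int × Int) × (Int × Int))) (acc : List (Int × Int)),
      l.foldl (fun res line1 => wire2.foldl (stepA line1) res) acc =
      acc ++ l.flatMap (fun s =>
        if s.1.2 == s.2.2 then
          (horizIndex wire2).filterMap (hitsH s.1.2 (min s.1.1 s.2.1) (max s.1.1 s.2.1))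
        else
          (vertIndex wire2).filterMap (hitsV (if s.1.2 ≤ s.2.2 then s.1 else s.2).1
            (min s.1.2 s.2.2) (max s.1.2 s.2.2))) := by
    intro l
    induction l with
    | nil => simp
    | cons s t ih =>
      intro acc
      rw [List.foldl_cons, inner_eq, ih, List.flatMap_cons]
      by_cases hv : (s.1.2 == s.2.2) = true
      · rw [filterMap_contrib_vert s (by simp [isVertical, hv])]
        simp [hv, List.append_assoc]
      · have hb : (s.1.2 == s.2.2) = false := by simpa using hv
        rw [filterMap_contrib_horiz s (by simp [isVertical, hb])]
        simp [hb, List.append_assoc]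
  rw [hgen wire1 [], List.nil_append]
  refine congrArg (fun f => wire1.flatMap f) (funext (fun s => ?_))
  by_cases hv : (s.1.2 == s.2.2) = true
  · simp only [hv, if_pos]
    rw [query_eq _ _ _ _ _ (pairwise_j_horizIdx wire2), proj_horiz]
  · simp only [hv, Bool.false_eq_true, if_false]
    rw [query_eq _ _ _ _ _ (pairwise_j_vertIdx wire2), proj_vert]
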